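-- pv_equiv track=rewrite | github.com/prophile/srcomp-unified | ranker/sr/comp/ranker/__init__.py | calc_ranked_points
-- ===== SOURCE A (Python) =====
-- def calc_ranked_points(pos_map, dsq_list=()):
--     """
--     Calculate SR league points from a mapping of positions to teams.
--
--     Parameters
--     ----------
--     pos_map : dict
--         A mapping from positions (integers indicating ending position, such as
--         1 for 1\ :sup:`st`, 3 for 3\ :sup:`rd` etc) to some iterable of teams
--         or zones in that position.
--     dsq_list : list
--         If provided, is a :py:class:`list` of teams or zones that are
--         considered to be disqualified.
--
--     Returns
--     -------
--     dict
--         A mapping from zones/teams to SR league points.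
--
--     Note
--     ----
--     League points, and their calculation, are described in detail in the SR
--     rulebook_.
--
--     .. _rulebook: https://www.studentrobotics.org/resources/2015/rulebook.pdf
--
--     Examples
--     --------
--     Some examples of usage are shownn below.
--
--     >>> calc_ranked_points({1: ['A'], 2: ['B'], 3: ['C'], 4: ['D']})
--     {'A': 8, 'B': 6, 'C': 4, 'D': 2}
--
--     >>> calc_ranked_points({1: ['A', 'B'], 2: ['C', 'D']})
--     {'A': 7, 'B': 7, 'C': 3, 'D': 4}
--
--     >>> calc_ranked_points({1: ['B'], 2: ['D'], 3: ['A', 'C']}, ['A', 'C'])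
--     {'A': 0, 'B': 8, 'C': 0, 'D': 6}
--     """
--
--     rpoints = {}
--
--     for pos, zones in pos_map.items():
--         # remove any that are dsqaulified
--         # note that we do this before working out the ties, so that any
--         # dsq tie members are removed from contention
--         zones = [z for z in zones if z not in dsq_list]
--         if len(zones) == 0:
--             continue
--
--         # max points is 8, decreases by two for subsequent positions. pos is
--         # 1-indexed, hence the subtraction
--         points = 8 - 2*(pos - 1)
--         # Now that we have the value for this position if it were not a tie,
--         # we need to allow for ties. In case of a tie, the available points
--         # for all the places used are shared by all those thus placed.
--         # Eg: three first places get 6pts each (8+6+4)/3.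
--         # Rather than generate a list and average it, it's quicker to just
--         # do some maths using the max value and the length of the list
--         points = points - (len(zones) - 1)
--         for zone in zones:
--             rpoints[zone] = points
--
--     # those that were dsq get 0
--     for disqualified_zone in dsq_list:
--         rpoints[disqualified_zone] = 0
--
--     return rpoints
-- ===== SOURCE B (Python) =====
-- def calc_ranked_points(pos_map, dsq_list=()):
--     # Two-stage: flatten positions into a flat (zone, points) pair stream,
--     # then materialise the dict from it in one go (dict() keeps first-insertion
--     # order and last value, exactly like incremental assignment).
--     def share(pos, n):
--         # sum of the n raw slot values the tied group occupies, shared equally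
--         base = 8 - 2 * (pos - 1)
--         return sum(base - 2 * i for i in range(n)) // n
--     pairs = []
--     for pos, zones in pos_map.items():
--         survivors = [z for z in zones if z not in dsq_list]
--         pairs += [(z, share(pos, len(survivors))) for z in survivors]
--     pairs += [(z, 0) for z in dsq_list]
--     return dict(pairs)
-- ===== Notes on version B (the rewrite author's own statement) =====
-- stated objective: alternative
-- what changed: B first flattens everything (survivors with their tie-shared points, computed by summing the occupied slot values and integer-dividing by the group size, plus the dsq zeros) into one flat pair list and only then builds the dict from it in a single pass, instead of A's interleaved dict mutation with a closed-form formula and a skip branch.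
import Mathlib
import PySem

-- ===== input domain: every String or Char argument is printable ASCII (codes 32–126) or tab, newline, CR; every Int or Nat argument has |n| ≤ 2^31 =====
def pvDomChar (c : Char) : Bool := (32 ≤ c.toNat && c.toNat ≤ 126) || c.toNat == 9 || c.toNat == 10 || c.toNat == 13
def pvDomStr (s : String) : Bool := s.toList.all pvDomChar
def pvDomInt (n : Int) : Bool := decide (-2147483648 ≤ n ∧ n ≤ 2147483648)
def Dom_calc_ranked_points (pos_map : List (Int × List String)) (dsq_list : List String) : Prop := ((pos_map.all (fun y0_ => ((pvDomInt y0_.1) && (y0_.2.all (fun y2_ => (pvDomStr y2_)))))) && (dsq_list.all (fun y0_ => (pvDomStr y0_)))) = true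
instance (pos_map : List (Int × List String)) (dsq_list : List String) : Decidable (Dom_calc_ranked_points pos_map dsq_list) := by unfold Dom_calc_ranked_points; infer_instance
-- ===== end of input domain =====

-- B flattens everything into one (zone, points) pair stream — tie-shared points computed by
-- summing the occupied slot values — and builds the dict from it in a single final pass,
-- instead of A's interleaved dict mutation with a closed-form formula (alternative, same cost).

-- ===== PORT A =====
def calc_ranked_points (pos_map : List (Int × List String)) (dsq_list : List String) : List (String × Int) :=
  let rpoints : PySem.Dict String Int :=
    pos_map.foldl (fun r pz =>
      let zones := pz.2.filter (fun z => decide (z ∉ dsq_list))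
      if zones.length = 0 then r
      else
        let points : Int := 8 - 2 * (pz.1 - 1)
        let points := points - ((zones.length : Int) - 1)
        zones.foldl (fun r z => r.insert z points) r) PySem.Dict.empty
  let rpoints := dsq_list.foldl (fun r z => r.insert z 0) rpoints
  rpoints.items

-- ===== PORT B =====
-- share(pos, n): sum of the n slot values occupied by the tied group, divided by n
def pvShare (pos : Int) (n : Nat) : Int :=
  let base : Int := 8 - 2 * (pos - 1)
  PySem.Int.floordiv ((PySem.List.pyRange 0 (n : Int) 1).map (fun i => base - 2 * i)).sum (n : Int)

def calc_ranked_points_alt (pos_map : List (Int × List String)) (dsq_list : List String) : List (String × Int) :=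
  let pairs : List (String × Int) :=
    pos_map.foldl (fun acc pz =>
      let survivors := pz.2.filter (fun z => decide (z ∉ dsq_list))
      acc ++ survivors.map (fun z => (z, pvShare pz.1 survivors.length))) []
  let pairs := pairs ++ dsq_list.map (fun z => (z, (0 : Int)))
  (pairs.foldl (fun (r : PySem.Dict String Int) p => r.insert p.1 p.2) PySem.Dict.empty).items

-- ===== PRECONDITION & SPEC =====
def Spec_calc_ranked_points (pos_map : List (Int × List String)) (dsq_list : List String) (out : List (String × Int)) : Prop := out = calc_ranked_points_alt pos_map dsq_list
instance (pos_map : List (Int × List String)) (dsq_list : List String) (out : List (String × Int)) : Decidable (Spec_calc_ranked_points pos_map dsq_list out) := by unfold Spec_calc_ranked_points; infer_instance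

-- ===== CLAIM (what is proved, stated in full; the proofs are below) =====
def Claim_equal_calc_ranked_points : Prop := ∀ (pos_map : List (Int × List String)) (dsq_list : List String), Dom_calc_ranked_points pos_map dsq_list → Spec_calc_ranked_points pos_map dsq_list (calc_ranked_points pos_map dsq_list)

-- ===== LEMMAS AND PROOFS =====

-- the sum of the n raw slot values starting at base
lemma slots_sum (base : Int) (n : Nat) :
    ((PySem.List.pyRange 0 (n : Int) 1).map (fun i => base - 2 * i)).sum
      = n * base - n * (n - 1) := by
  induction n with
  | zero => simp
  | succ m ih =>
    have h : ((m : Int) + 1) = ((m + 1 : Nat) : Int) := by push_cast; ring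
    rw [← h, PySem.List.pyRange_one_succ_right (by positivity)]
    simp only [List.map_append, List.sum_append, List.map_cons, List.map_nil, List.sum_cons,
      List.sum_nil, ih]
    ring

-- B's shared value equals A's closed form for a nonempty group
lemma pvShare_eq (pos : Int) (n : Nat) (hn : n ≠ 0) :
    pvShare pos n = (8 - 2 * (pos - 1)) - ((n : Int) - 1) := by
  simp only [pvShare]
  rw [slots_sum]
  have hpos : (0 : Int) < (n : Int) := by exact_mod_cast Nat.pos_of_ne_zero hn
  rw [PySem.Int.floordiv_eq_iff_of_pos hpos]
  constructor <;> nlinarith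

-- flushing one position's pair block into the dict is A's per-position step
lemma block_foldl (dsq_list : List String) (pz : Int × List String) (r : PySem.Dict String Int) :
    ((pz.2.filter (fun z => decide (z ∉ dsq_list))).map
        (fun z => (z, pvShare pz.1 (pz.2.filter (fun z => decide (z ∉ dsq_list))).length))).foldl
      (fun (r : PySem.Dict String Int) p => r.insert p.1 p.2) r
    = (let zones := pz.2.filter (fun z => decide (z ∉ dsq_list))
       if zones.length = 0 then r
       else
         let points : Int := 8 - 2 * (pz.1 - 1)
         let points := points - ((zones.length : Int) - 1)
         zones.foldl (fun r z => r.insert z points) r) := by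
  by_cases h : (pz.2.filter (fun z => decide (z ∉ dsq_list))).length = 0
  · rw [if_pos h, List.length_eq_zero_iff.mp h]
    simp
  · rw [if_neg h, List.foldl_map, pvShare_eq pz.1 _ h]

-- the flattened pair stream, folded into the dict, equals A's interleaved fold
lemma flat_foldl (dsq_list : List String) (L : List (Int × List String))
    (r : PySem.Dict String Int) :
    (L.flatMap (fun pz =>
        (pz.2.filter (fun z => decide (z ∉ dsq_list))).map
          (fun z => (z, pvShare pz.1 (pz.2.filter (fun z => decide (z ∉ dsq_list))).length)))).foldl
      (fun (r : PySem.Dict String Int) p => r.insert p.1 p.2) r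
    = L.foldl (fun r pz =>
        let zones := pz.2.filter (fun z => decide (z ∉ dsq_list))
        if zones.length = 0 then r
        else
          let points : Int := 8 - 2 * (pz.1 - 1)
          let points := points - ((zones.length : Int) - 1)
          zones.foldl (fun r z => r.insert z points) r) r := by
  induction L generalizing r with
  | nil => simp
  | cons a L ih =>
    simp only [List.flatMap_cons, List.foldl_append, List.foldl_cons]
    rw [block_foldl, ih]

theorem calc_ranked_points_spec : Claim_equal_calc_ranked_points := by
  unfold Claim_equal_calc_ranked_points
  intro pos_map dsq_list _
  unfold Spec_calc_ranked_points calc_ranked_points calc_ranked_points_alt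
  simp only [PySem.List.foldl_append_eq_flatMap, List.nil_append, List.foldl_append,
    List.foldl_map, flat_foldl]

-- ===== VERDICT (by name: the statement is the Claim_ definition above) =====
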